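-- pv_equiv track=rewrite | github.com/Vailish/ZICO_Algorithm_Study | mine/python/case/programmers/prog_87391_공_이동_시뮬레이션/s2.py | solution
-- ===== SOURCE A (Python) =====
-- def solution(n, m, x, y, queries):
--     min_r, max_r, min_c, max_c = y, y, x, x
--     # 거꾸로 돌리면서 범위를 잡아감
--     for query in reversed(queries):
--         command, dx = query
--         if command == 0: # 오른쪽으로감
--             max_r += dx
--             if max_r > m-1:
--                 max_r = m-1
--             if min_r != 0:
--                 min_r += dx
--
--         elif command == 1: # 왼쪽으로감
--             min_r -= dx
--             if min_r < 0:
--                 min_r = 0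
--             if max_r != m-1:
--                 max_r -= dx
--
--         elif command == 2: # 아래쪽으로감
--             max_c += dx
--             if max_c > n - 1:
--                 max_c = n - 1
--             if min_c != 0:
--                 min_c += dx
--
--         else: # command == 3일때 # 위쪽으로감
--             min_c -= dx
--             if min_c < 0:
--                 min_c = 0
--             if max_c != n - 1:
--                 max_c -= dx
--
--         if min_r > m-1 or max_r < 0 or min_c > n-1 or max_c < 0:
--             return 0
--
--     return (max_r - min_r + 1) * (max_c - min_c + 1)
-- ===== SOURCE B (Python) =====
-- def _row_bounds(lo, hi, limit, queries):
--     dead = False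
--     for command, d in reversed(queries):
--         if command == 0:
--             hi = min(hi + d, limit)
--             if lo != 0:
--                 lo += d
--         elif command == 1:
--             lo = max(lo - d, 0)
--             if hi != limit:
--                 hi -= d
--         if lo > limit or hi < 0:
--             dead = True
--     return lo, hi, dead
--
--
-- def _col_bounds(lo, hi, limit, queries):
--     dead = False
--     for command, d in reversed(queries):
--         if command == 2:
--             hi = min(hi + d, limit)
--             if lo != 0:
--                 lo += d
--         elif command != 0 and command != 1:
--             lo = max(lo - d, 0)
--             if hi != limit:
--                 hi -= d
--         if lo > limit or hi < 0:
--             dead = True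
--     return lo, hi, dead
--
--
-- def solution(n, m, x, y, queries):
--     min_r, max_r, row_dead = _row_bounds(y, y, m - 1, queries)
--     min_c, max_c, col_dead = _col_bounds(x, x, n - 1, queries)
--     if row_dead or col_dead:
--         return 0
--     return (max_r - min_r + 1) * (max_c - min_c + 1)
-- ===== Notes on version B (the rewrite author's own statement) =====
-- stated objective: alternative
-- what changed: A runs one reverse pass over a 4-field state with an early return; B decomposes the simulation into two independent per-axis reverse passes (rows and columns) that keep a sticky dead flag instead of returning early, then combines the two axes at the end.
import Mathlib
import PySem

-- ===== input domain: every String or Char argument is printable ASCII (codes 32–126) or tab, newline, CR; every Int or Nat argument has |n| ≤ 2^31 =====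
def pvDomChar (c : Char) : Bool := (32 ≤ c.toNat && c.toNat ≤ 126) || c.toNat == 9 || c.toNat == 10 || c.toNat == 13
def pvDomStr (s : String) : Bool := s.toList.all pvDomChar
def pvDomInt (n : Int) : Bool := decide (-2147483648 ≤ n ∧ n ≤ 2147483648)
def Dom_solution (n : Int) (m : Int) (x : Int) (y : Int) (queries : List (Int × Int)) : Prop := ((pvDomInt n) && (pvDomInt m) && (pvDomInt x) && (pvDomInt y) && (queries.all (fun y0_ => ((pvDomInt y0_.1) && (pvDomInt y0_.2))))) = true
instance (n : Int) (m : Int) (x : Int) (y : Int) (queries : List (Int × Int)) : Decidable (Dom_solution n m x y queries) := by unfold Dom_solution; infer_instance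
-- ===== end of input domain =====

-- B replaces A's single 4-field reverse loop with an early return by two independent
-- per-axis reverse passes carrying a sticky dead flag (objective: alternative decomposition).

-- ===== PORT A =====
-- one step of A's loop body: updates the 4-tuple (min_r, max_r, min_c, max_c)
def pvAUpd (n : Int) (m : Int) (command : Int) (dx : Int)
    (mr Mr mc Mc : Int) : Int × Int × Int × Int :=
  if command = 0 then
    let Mr1 := Mr + dx
    let Mr2 := if Mr1 > m - 1 then m - 1 else Mr1
    let mr2 := if mr ≠ 0 then mr + dx else mr
    (mr2, Mr2, mc, Mc)
  else if command = 1 then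
    let mr1 := mr - dx
    let mr2 := if mr1 < 0 then 0 else mr1
    let Mr2 := if Mr ≠ m - 1 then Mr - dx else Mr
    (mr2, Mr2, mc, Mc)
  else if command = 2 then
    let Mc1 := Mc + dx
    let Mc2 := if Mc1 > n - 1 then n - 1 else Mc1
    let mc2 := if mc ≠ 0 then mc + dx else mc
    (mr, Mr, mc2, Mc2)
  else
    let mc1 := mc - dx
    let mc2 := if mc1 < 0 then 0 else mc1
    let Mc2 := if Mc ≠ n - 1 then Mc - dx else Mc
    (mr, Mr, mc2, Mc2)

-- A's loop over reversed(queries), with the early 'return 0'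
def pvALoop (n m : Int) : List (Int × Int) → Int → Int → Int → Int → Int
  | [], mr, Mr, mc, Mc => (Mr - mr + 1) * (Mc - mc + 1)
  | (command, dx) :: rest, mr, Mr, mc, Mc =>
    let s := pvAUpd n m command dx mr Mr mc Mc
    if s.1 > m - 1 ∨ s.2.1 < 0 ∨ s.2.2.1 > n - 1 ∨ s.2.2.2 < 0 then 0
    else pvALoop n m rest s.1 s.2.1 s.2.2.1 s.2.2.2

def solution (n : Int) (m : Int) (x : Int) (y : Int) (queries : List (Int × Int)) : Int :=
  pvALoop n m queries.reverse y y x x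

-- ===== PORT B =====
-- B's row pass: commands 0/1 only, sticky dead flag
def pvRowLoop (m : Int) : List (Int × Int) → Int → Int → Bool → Int × Int × Bool
  | [], lo, hi, dead => (lo, hi, dead)
  | (command, d) :: rest, lo, hi, dead =>
    let p : Int × Int :=
      if command = 0 then (if lo ≠ 0 then lo + d else lo, min (hi + d) (m - 1))
      else if command = 1 then (max (lo - d) 0, if hi ≠ m - 1 then hi - d else hi)
      else (lo, hi)
    pvRowLoop m rest p.1 p.2 (dead || decide (p.1 > m - 1 ∨ p.2 < 0))

-- B's column pass: command 2 grows, any command other than 0/1/2 shrinks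
def pvColLoop (n : Int) : List (Int × Int) → Int → Int → Bool → Int × Int × Bool
  | [], lo, hi, dead => (lo, hi, dead)
  | (command, d) :: rest, lo, hi, dead =>
    let p : Int × Int :=
      if command = 2 then (if lo ≠ 0 then lo + d else lo, min (hi + d) (n - 1))
      else if command ≠ 0 ∧ command ≠ 1 then (max (lo - d) 0, if hi ≠ n - 1 then hi - d else hi)
      else (lo, hi)
    pvColLoop n rest p.1 p.2 (dead || decide (p.1 > n - 1 ∨ p.2 < 0))

def solution_alt (n : Int) (m : Int) (x : Int) (y : Int) (queries : List (Int × Int)) : Int :=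
  let r := pvRowLoop m queries.reverse y y false
  let c := pvColLoop n queries.reverse x x false
  if r.2.2 || c.2.2 then 0
  else (r.2.1 - r.1 + 1) * (c.2.1 - c.1 + 1)

-- ===== PRECONDITION & SPEC =====
def Spec_solution (n : Int) (m : Int) (x : Int) (y : Int) (queries : List (Int × Int)) (out : Int) : Prop := out = solution_alt n m x y queries
instance (n : Int) (m : Int) (x : Int) (y : Int) (queries : List (Int × Int)) (out : Int) : Decidable (Spec_solution n m x y queries out) := by unfold Spec_solution; infer_instance

-- ===== CLAIM (what is proved, stated in full; the proofs are below) =====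
def Claim_equal_solution : Prop := ∀ (n : Int) (m : Int) (x : Int) (y : Int) (queries : List (Int × Int)), Dom_solution n m x y queries → Spec_solution n m x y queries (solution n m x y queries)

-- ===== LEMMAS AND PROOFS =====

-- the dead flag is sticky and the bounds are independent of it
theorem pvRowLoop_dead (m : Int) (l : List (Int × Int)) (lo hi : Int) (d : Bool) :
    pvRowLoop m l lo hi d =
      ((pvRowLoop m l lo hi false).1, (pvRowLoop m l lo hi false).2.1,
        d || (pvRowLoop m l lo hi false).2.2) := by
  induction l generalizing lo hi d with
  | nil => simp [pvRowLoop]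
  | cons q rest ih =>
    obtain ⟨c, dx⟩ := q
    simp only [pvRowLoop]
    rw [ih, ih (d := false || _)]
    simp [Bool.or_assoc]

theorem pvColLoop_dead (n : Int) (l : List (Int × Int)) (lo hi : Int) (d : Bool) :
    pvColLoop n l lo hi d =
      ((pvColLoop n l lo hi false).1, (pvColLoop n l lo hi false).2.1,
        d || (pvColLoop n l lo hi false).2.2) := by
  induction l generalizing lo hi d with
  | nil => simp [pvColLoop]
  | cons q rest ih =>
    obtain ⟨c, dx⟩ := q
    simp only [pvColLoop]
    rw [ih, ih (d := false || _)]
    simp [Bool.or_assoc]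

-- A's combined update splits into B's two per-axis updates
theorem pvAUpd_split (n m c d mr Mr mc Mc : Int) :
    pvAUpd n m c d mr Mr mc Mc =
      ((if c = 0 then (if mr ≠ 0 then mr + d else mr, min (Mr + d) (m - 1))
        else if c = 1 then (max (mr - d) 0, if Mr ≠ m - 1 then Mr - d else Mr)
        else (mr, Mr)).1,
       (if c = 0 then (if mr ≠ 0 then mr + d else mr, min (Mr + d) (m - 1))
        else if c = 1 then (max (mr - d) 0, if Mr ≠ m - 1 then Mr - d else Mr)
        else (mr, Mr)).2,
       (if c = 2 then (if mc ≠ 0 then mc + d else mc, min (Mc + d) (n - 1))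
        else if c ≠ 0 ∧ c ≠ 1 then (max (mc - d) 0, if Mc ≠ n - 1 then Mc - d else Mc)
        else (mc, Mc)).1,
       (if c = 2 then (if mc ≠ 0 then mc + d else mc, min (Mc + d) (n - 1))
        else if c ≠ 0 ∧ c ≠ 1 then (max (mc - d) 0, if Mc ≠ n - 1 then Mc - d else Mc)
        else (mc, Mc)).2) := by
  unfold pvAUpd
  by_cases h0 : c = 0 <;> by_cases h1 : c = 1 <;> by_cases h2 : c = 2 <;>
    simp [h0, h1, h2, Prod.ext_iff, min_def, max_def] <;> split_ifs <;> omega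

-- main invariant: A's loop equals the combination of B's two passes
theorem pvMain (n m : Int) (l : List (Int × Int)) :
    ∀ (mr Mr mc Mc : Int),
      pvALoop n m l mr Mr mc Mc =
        (if (pvRowLoop m l mr Mr false).2.2 || (pvColLoop n l mc Mc false).2.2 then 0
         else ((pvRowLoop m l mr Mr false).2.1 - (pvRowLoop m l mr Mr false).1 + 1) *
              ((pvColLoop n l mc Mc false).2.1 - (pvColLoop n l mc Mc false).1 + 1)) := by
  induction l with
  | nil => intro mr Mr mc Mc; simp [pvALoop, pvRowLoop, pvColLoop]
  | cons q rest ih =>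
    intro mr Mr mc Mc
    obtain ⟨c, d⟩ := q
    rw [pvALoop]
    rw [pvAUpd_split]
    set pr := (if c = 0 then (if mr ≠ 0 then mr + d else mr, min (Mr + d) (m - 1))
        else if c = 1 then (max (mr - d) 0, if Mr ≠ m - 1 then Mr - d else Mr)
        else (mr, Mr)) with hpr
    set pc := (if c = 2 then (if mc ≠ 0 then mc + d else mc, min (Mc + d) (n - 1))
        else if c ≠ 0 ∧ c ≠ 1 then (max (mc - d) 0, if Mc ≠ n - 1 then Mc - d else Mc)
        else (mc, Mc)) with hpc
    simp only [pvRowLoop, pvColLoop, ← hpr, ← hpc, Bool.false_or]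
    rw [pvRowLoop_dead m rest pr.1 pr.2, pvColLoop_dead n rest pc.1 pc.2]
    by_cases hbad : pr.1 > m - 1 ∨ pr.2 < 0 ∨ pc.1 > n - 1 ∨ pc.2 < 0
    · simp only [if_pos hbad]
      have h' : (decide (pr.1 > m - 1 ∨ pr.2 < 0) = true) ∨
          (decide (pc.1 > n - 1 ∨ pc.2 < 0) = true) := by
        simp only [decide_eq_true_eq]; tauto
      rcases h' with h | h <;> rw [h] <;> simp
    · have hr : decide (pr.1 > m - 1 ∨ pr.2 < 0) = false := by
        simp only [decide_eq_false_iff_not]; tauto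
      have hc : decide (pc.1 > n - 1 ∨ pc.2 < 0) = false := by
        simp only [decide_eq_false_iff_not]; tauto
      simp only [if_neg hbad, hr, hc, Bool.false_or]
      exact ih pr.1 pr.2 pc.1 pc.2

-- ===== VERDICT (by name: the statement is the Claim_ definition above) =====
theorem solution_spec : Claim_equal_solution := by
  intro n m x y queries _
  unfold Spec_solution solution solution_alt
  exact pvMain n m queries.reverse y y x x
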